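-- pv_equiv track=rewrite | github.com/LucaSforza/algoritmi2 | algo2/batteria3/es2f.py | es2fmat
-- ===== SOURCE A (Python) =====
-- def es2fmat(grafo:list[list[int]])->list[list[int]]: # H(n^3)
--     contIteraz = 0
--     gQuadro = [set() for _ in range(len(grafo))]
--     for inl,line in enumerate(grafo): # H(n)
--         contIteraz+=1
--         for ie,edge in enumerate(line): # H(n)
--             contIteraz+=1
--             if edge:
--                 gQuadro[inl].add(ie)
--                 for ieq,edgeq in enumerate(grafo[ie]): # H(n)
--                     contIteraz+=1
--                     if edgeq:
--                         gQuadro[inl].add(ieq)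
--     return gQuadro,contIteraz
-- ===== SOURCE B (Python) =====
-- def es2fmat(grafo: list[list[int]]) -> list[list[int]]:
--     # One pass builds adjacency lists once; per-node 2-step sets come from a
--     # flatten+set over precomputed neighbour lists; the iteration counter is
--     # computed in closed form instead of being incremented step by step.
--     n = len(grafo)
--     nbrs = [[j for j, e in enumerate(row) if e] for row in grafo]
--     gQuadro = [set(x for j in nb for x in [j] + nbrs[j]) for nb in nbrs]
--     cont = n + sum(len(row) for row in grafo) \
--              + sum(len(grafo[j]) for nb in nbrs for j in nb)
--     return gQuadro, cont
-- ===== Notes on version B (the rewrite author's own statement) =====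
-- stated objective: simpler
-- what changed: B precomputes the adjacency (nonzero-column) lists once, builds each node's 2-step set by flattening j plus nbrs[j] into one set() call, and computes the iteration counter in closed form (n + total entries + sum of row lengths over edges) instead of A's three nested counting loops with in-place set mutation.
import Mathlib
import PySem

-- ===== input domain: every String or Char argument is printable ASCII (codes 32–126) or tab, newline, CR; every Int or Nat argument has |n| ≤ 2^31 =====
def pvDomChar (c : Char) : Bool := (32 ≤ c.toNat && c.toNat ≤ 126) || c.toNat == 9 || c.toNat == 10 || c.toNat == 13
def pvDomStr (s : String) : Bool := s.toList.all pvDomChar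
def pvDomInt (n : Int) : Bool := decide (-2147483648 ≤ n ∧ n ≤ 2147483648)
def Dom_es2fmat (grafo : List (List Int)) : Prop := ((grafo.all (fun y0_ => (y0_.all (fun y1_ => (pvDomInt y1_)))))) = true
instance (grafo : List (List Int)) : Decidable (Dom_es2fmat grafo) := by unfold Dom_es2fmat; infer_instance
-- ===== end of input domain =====

-- B replaces A's three nested counting loops by a precomputed adjacency list, a flatten+set per row,
-- and a closed-form iteration counter (objective: simpler).

-- ===== PORT A =====
-- literal transliteration of A: state (gQuadro, contIteraz), indexed in-place updates via pySetD/pyGetD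
def es2fmat (grafo : List (List Int)) : List (List Int) × Int :=
  (PySem.List.enumerate grafo).foldl
    (fun (st : List (PySem.Set Int) × Int) (p : Int × List Int) =>
      (PySem.List.enumerate p.2).foldl
        (fun (st2 : List (PySem.Set Int) × Int) (q : Int × Int) =>
          if q.2 ≠ 0 then
            (PySem.List.enumerate (PySem.List.pyGetD grafo q.1 [])).foldl
              (fun (st3 : List (PySem.Set Int) × Int) (r : Int × Int) =>
                if r.2 ≠ 0 then
                  (PySem.List.pySetD st3.1 p.1
                    (PySem.Set.add (PySem.List.pyGetD st3.1 p.1 PySem.Set.empty) r.1), st3.2 + 1)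
                else (st3.1, st3.2 + 1))
              (PySem.List.pySetD st2.1 p.1
                 (PySem.Set.add (PySem.List.pyGetD st2.1 p.1 PySem.Set.empty) q.1), st2.2 + 1)
          else (st2.1, st2.2 + 1))
        (st.1, st.2 + 1))
    (grafo.map (fun _ => (PySem.Set.empty : PySem.Set Int)), 0)

-- ===== PORT B =====
def es2fmat_alt (grafo : List (List Int)) : List (List Int) × Int :=
  let nbrs : List (List Int) :=
    grafo.map (fun row => ((PySem.List.enumerate row).filter (fun q => q.2 ≠ 0)).map (·.1))
  let gQuadro : List (PySem.Set Int) :=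
    nbrs.map (fun nb => PySem.Set.ofList (nb.flatMap (fun j => j :: PySem.List.pyGetD nbrs j [])))
  let cont : Int :=
    (grafo.length : Int) + (grafo.map (fun row => (row.length : Int))).sum
      + (nbrs.map (fun nb =>
          (nb.map (fun j => ((PySem.List.pyGetD grafo j []).length : Int))).sum)).sum
  (gQuadro, cont)

-- ===== PRECONDITION & SPEC =====
-- Pre_ excludes exactly the inputs where Python A raises IndexError: a nonzero entry in some
-- column ie with ie ≥ len(grafo) makes grafo[ie] raise (B raises there too).
def Pre_es2fmat (grafo : List (List Int)) : Prop :=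
  ∀ row ∈ grafo, ∀ q ∈ PySem.List.enumerate row 0, q.2 ≠ 0 → q.1 < (grafo.length : Int)
instance (grafo : List (List Int)) : Decidable (Pre_es2fmat grafo) := by unfold Pre_es2fmat; infer_instance
def pvWitness_es2fmat : List (List Int) := [[1, 0], [0, 1]]
def Spec_es2fmat (grafo : List (List Int)) (out : List (List Int) × Int) : Prop := out = es2fmat_alt grafo
instance (grafo : List (List Int)) (out : List (List Int) × Int) : Decidable (Spec_es2fmat grafo out) := by unfold Spec_es2fmat; infer_instance

-- ===== CLAIM (what is proved, stated in full; the proofs are below) =====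
def Claim_equal_es2fmat : Prop := ∀ (grafo : List (List Int)), Dom_es2fmat grafo → Pre_es2fmat grafo → Spec_es2fmat grafo (es2fmat grafo)


-- ===== LEMMAS AND PROOFS =====

-- proof-side abbreviations
def nbrsOf (row : List Int) : List Int :=
  ((PySem.List.enumerate row).filter (fun q => q.2 ≠ 0)).map (·.1)

def pvStream (grafo : List (List Int)) (line : List Int) (s : Int) : List Int :=
  ((PySem.List.enumerate line s).filter (fun q => q.2 ≠ 0)).flatMap
    (fun q => q.1 :: nbrsOf (PySem.List.pyGetD grafo q.1 []))

def pvECount (grafo : List (List Int)) (line : List Int) (s : Int) : Int :=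
  (((PySem.List.enumerate line s).filter (fun q => q.2 ≠ 0)).map
    (fun q => ((PySem.List.pyGetD grafo q.1 []).length : Int))).sum


theorem pv_getD_set (gQ : List (PySem.Set Int)) {i : Nat} (hi : i < gQ.length) (v : PySem.Set Int) :
    (gQ.set i v).getD i PySem.Set.empty = v := by
  rw [List.getD_eq_getElem _ _ (by simpa using hi), List.getElem_set_self]

theorem pvECount_cons (grafo : List (List Int)) (e : Int) (line : List Int) (s : Int) :
    pvECount grafo (e :: line) s
      = (if e ≠ 0 then ((PySem.List.pyGetD grafo s []).length : Int) else 0)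
        + pvECount grafo line (s + 1) := by
  by_cases h : e = 0 <;> simp [pvECount, PySem.List.enumerate_cons, List.filter_cons, h]

theorem pvStream_cons (grafo : List (List Int)) (e : Int) (line : List Int) (s : Int) :
    pvStream grafo (e :: line) s
      = (if e ≠ 0 then s :: nbrsOf (PySem.List.pyGetD grafo s []) else [])
        ++ pvStream grafo line (s + 1) := by
  by_cases h : e = 0 <;> simp [pvStream, PySem.List.enumerate_cons, List.filter_cons, h]

-- A's innermost loop: all updates hit the one slot i; it appends adds and counts every step
theorem pv_inner (row : List Int) (s : Int) (i : Nat) :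
    ∀ (gQ : List (PySem.Set Int)) (c : Int), i < gQ.length →
    (PySem.List.enumerate row s).foldl
      (fun (st3 : List (PySem.Set Int) × Int) (r : Int × Int) =>
        if r.2 ≠ 0 then
          (PySem.List.pySetD st3.1 (i : Int)
            (PySem.Set.add (PySem.List.pyGetD st3.1 (i : Int) PySem.Set.empty) r.1), st3.2 + 1)
        else (st3.1, st3.2 + 1)) (gQ, c)
    = (gQ.set i
        (List.foldl PySem.Set.add (gQ.getD i PySem.Set.empty)
          (((PySem.List.enumerate row s).filter (fun q => q.2 ≠ 0)).map (·.1))),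
       c + row.length) := by
  induction row generalizing s with
  | nil =>
      intro gQ c hi
      simp only [PySem.List.enumerate_nil, List.filter_nil, List.map_nil, List.foldl_nil,
        List.length_nil]
      rw [List.getD_eq_getElem _ _ hi, List.set_getElem_self]
      simp
  | cons r0 row ih =>
      intro gQ c hi
      rw [PySem.List.enumerate_cons, List.foldl_cons]
      by_cases h0 : r0 = 0
      · subst h0
        rw [if_neg (by simp)]
        rw [ih (s + 1) gQ (c + 1) hi]
        simp only [List.filter_cons, Prod.mk.injEq]
        exact ⟨by simp, by simp only [List.length_cons]; push_cast; ring⟩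
      · rw [if_pos (by simpa using h0)]
        rw [PySem.List.pySetD_natCast, PySem.List.pyGetD_natCast]
        rw [ih (s + 1) (gQ.set i (PySem.Set.add (gQ.getD i PySem.Set.empty) s)) (c + 1)
              (by simpa using hi)]
        rw [List.set_set, List.getD_eq_getElem _ _ (by simpa using hi),
            List.getElem_set_self]
        simp only [List.filter_cons, decide_eq_true_eq, if_pos (show (s, r0).2 ≠ 0 from h0),
          List.map_cons, List.foldl_cons, List.length_cons, Prod.mk.injEq]
        constructor
        · simp [List.getD_eq_getElem _ _ hi]
        · push_cast; ring

-- A's middle loop: per nonzero entry (j, e) it adds j and then folds the inner loop over grafo[j]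
theorem pv_middle (grafo : List (List Int)) (line : List Int) (s : Int) (i : Nat) :
    ∀ (gQ : List (PySem.Set Int)) (c : Int), i < gQ.length →
    (PySem.List.enumerate line s).foldl
      (fun (st2 : List (PySem.Set Int) × Int) (q : Int × Int) =>
        if q.2 ≠ 0 then
          (PySem.List.enumerate (PySem.List.pyGetD grafo q.1 [])).foldl
            (fun (st3 : List (PySem.Set Int) × Int) (r : Int × Int) =>
              if r.2 ≠ 0 then
                (PySem.List.pySetD st3.1 (i : Int)
                  (PySem.Set.add (PySem.List.pyGetD st3.1 (i : Int) PySem.Set.empty) r.1), st3.2 + 1)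
              else (st3.1, st3.2 + 1))
            (PySem.List.pySetD st2.1 (i : Int)
               (PySem.Set.add (PySem.List.pyGetD st2.1 (i : Int) PySem.Set.empty) q.1), st2.2 + 1)
        else (st2.1, st2.2 + 1)) (gQ, c)
    = (gQ.set i
        (List.foldl PySem.Set.add (gQ.getD i PySem.Set.empty) (pvStream grafo line s)),
       c + line.length + pvECount grafo line s) := by
  induction line generalizing s with
  | nil =>
      intro gQ c hi
      simp only [PySem.List.enumerate_nil, pvStream, pvECount, List.filter_nil, List.map_nil,
        List.flatMap_nil, List.foldl_nil, List.sum_nil, List.length_nil]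
      rw [List.getD_eq_getElem _ _ hi, List.set_getElem_self]
      simp
  | cons e0 line ih =>
      intro gQ c hi
      rw [PySem.List.enumerate_cons, List.foldl_cons]
      by_cases h0 : e0 = 0
      · subst h0
        rw [if_neg (by simp)]
        rw [ih (s + 1) gQ (c + 1) hi]
        rw [pvStream_cons, pvECount_cons]
        simp only [Prod.mk.injEq, List.length_cons]
        norm_num
        push_cast
        ring
      · rw [if_pos (by simpa using h0)]
        rw [PySem.List.pySetD_natCast, PySem.List.pyGetD_natCast]
        rw [pv_inner (PySem.List.pyGetD grafo s []) 0 i _ _ (by simpa using hi)]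
        rw [List.set_set, pv_getD_set gQ hi]
        rw [ih (s + 1) _ _ (by simpa using hi)]
        rw [List.set_set, pv_getD_set gQ hi]
        rw [pvStream_cons, pvECount_cons, if_pos h0, if_pos h0]
        rw [List.cons_append, List.foldl_cons, List.foldl_append]
        simp only [Prod.mk.injEq, List.length_cons]
        constructor
        · rfl
        · push_cast; ring

-- A's outer loop: row k writes only slot k, which starts empty
theorem pv_outer (grafo : List (List Int)) :
    ∀ (rs : List (List Int)) (sn : Nat) (done : List (PySem.Set Int)) (c : Int),
    done.length = sn →
    (PySem.List.enumerate rs (sn : Int)).foldl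
      (fun (st : List (PySem.Set Int) × Int) (p : Int × List Int) =>
        (PySem.List.enumerate p.2).foldl
          (fun (st2 : List (PySem.Set Int) × Int) (q : Int × Int) =>
            if q.2 ≠ 0 then
              (PySem.List.enumerate (PySem.List.pyGetD grafo q.1 [])).foldl
                (fun (st3 : List (PySem.Set Int) × Int) (r : Int × Int) =>
                  if r.2 ≠ 0 then
                    (PySem.List.pySetD st3.1 p.1
                      (PySem.Set.add (PySem.List.pyGetD st3.1 p.1 PySem.Set.empty) r.1), st3.2 + 1)
                  else (st3.1, st3.2 + 1))
                (PySem.List.pySetD st2.1 p.1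
                   (PySem.Set.add (PySem.List.pyGetD st2.1 p.1 PySem.Set.empty) q.1), st2.2 + 1)
            else (st2.1, st2.2 + 1))
          (st.1, st.2 + 1))
      (done ++ rs.map (fun _ => (PySem.Set.empty : PySem.Set Int)), c)
    = (done ++ rs.map (fun line =>
          List.foldl PySem.Set.add PySem.Set.empty (pvStream grafo line 0)),
       c + (rs.map (fun line => 1 + (line.length : Int) + pvECount grafo line 0)).sum) := by
  intro rs
  induction rs with
  | nil => intro sn done c h; simp [PySem.List.enumerate_nil]
  | cons line rs ih =>
      intro sn done c h
      rw [PySem.List.enumerate_cons, List.foldl_cons]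
      have hlen : sn < (done ++ (line :: rs).map (fun _ => (PySem.Set.empty : PySem.Set Int))).length := by
        simp [h]
      rw [pv_middle grafo line 0 sn _ _ hlen]
      have hget : (done ++ (line :: rs).map (fun _ => (PySem.Set.empty : PySem.Set Int))).getD sn
            PySem.Set.empty = PySem.Set.empty := by
        rw [List.map_cons, List.getD_append_right _ _ _ _ (by omega)]
        simp [h]
      have hset : ∀ (v : PySem.Set Int),
          (done ++ (line :: rs).map (fun _ => (PySem.Set.empty : PySem.Set Int))).set sn v
          = (done ++ [v]) ++ rs.map (fun _ => (PySem.Set.empty : PySem.Set Int)) := by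
        intro v
        rw [List.map_cons, List.set_append]
        simp [h]
      rw [hget, hset]
      have hs1 : (sn : Int) + 1 = ((sn + 1 : Nat) : Int) := by push_cast; ring
      rw [hs1, ih (sn + 1) (done ++ [_]) _ (by simp [h])]
      simp only [List.map_cons, List.sum_cons, List.append_assoc, List.cons_append,
        List.nil_append, Prod.mk.injEq]
      exact ⟨trivial, by ring⟩
theorem es2fmat_spec : Claim_equal_es2fmat := by
  intro grafo _ _
  unfold Spec_es2fmat es2fmat
  have hout := pv_outer grafo grafo 0 [] 0 rfl
  simp only [Nat.cast_zero, List.nil_append] at hout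
  rw [hout]
  simp only [es2fmat_alt, List.map_map, Prod.mk.injEq]
  constructor
  · -- sets component
    show grafo.map (fun line => List.foldl PySem.Set.add PySem.Set.empty (pvStream grafo line 0))
        = grafo.map ((fun nb => PySem.Set.ofList (nb.flatMap
            (fun j => j :: PySem.List.pyGetD (grafo.map nbrsOf) j []))) ∘ nbrsOf)
    apply List.map_congr_left
    intro line _
    show List.foldl PySem.Set.add PySem.Set.empty (pvStream grafo line 0)
      = PySem.Set.ofList ((nbrsOf line).flatMap
          (fun j => j :: PySem.List.pyGetD (grafo.map nbrsOf) j []))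
    have hmapget : ∀ j : Int,
        PySem.List.pyGetD (grafo.map nbrsOf) j [] = nbrsOf (PySem.List.pyGetD grafo j []) := by
      intro j
      have h := PySem.List.pyGetD_map nbrsOf grafo j []
      simpa [nbrsOf, PySem.List.enumerate_nil] using h
    simp only [hmapget, PySem.Set.ofList_eq_foldl, pvStream, nbrsOf, List.flatMap_map]
    rfl
  · -- counter component
    show (0 : Int) + (grafo.map (fun line => 1 + (line.length : Int) + pvECount grafo line 0)).sum
        = (grafo.length : Int) + (grafo.map (fun row => (row.length : Int))).sum
          + (grafo.map ((fun nb =>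
              (nb.map (fun j => ((PySem.List.pyGetD grafo j []).length : Int))).sum) ∘ nbrsOf)).sum
    have hsplit : (grafo.map (fun line => 1 + (line.length : Int) + pvECount grafo line 0)).sum
        = (grafo.map (fun _ => (1 : Int))).sum
          + (grafo.map (fun line => (line.length : Int))).sum
          + (grafo.map (fun line => pvECount grafo line 0)).sum := by
      rw [show (fun (line : List Int) => 1 + (line.length : Int) + pvECount grafo line 0)
            = (fun line => ((1 : Int) + (line.length : Int)) + pvECount grafo line 0) from rfl]
      rw [PySem.List.sum_map_add_int grafo (fun line => (1 : Int) + (line.length : Int))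
            (fun line => pvECount grafo line 0),
          PySem.List.sum_map_add_int grafo (fun _ => (1 : Int)) (fun line => (line.length : Int))]
    have hec : (fun line => pvECount grafo line 0)
        = ((fun nb => (nb.map
            (fun j => ((PySem.List.pyGetD grafo j []).length : Int))).sum) ∘ nbrsOf) := by
      funext line
      simp [pvECount, nbrsOf, List.map_map]
      rfl
    rw [hsplit, PySem.List.sum_map_const_int, hec]
    ring
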